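-- pv_equiv track=rewrite | github.com/anthirion/advent_of_code_2024 | src/day3.py | extract_enabled_code
-- ===== SOURCE A (Python) =====
-- from functools import reduce
--
-- def extract_enabled_code(code: str) -> str:
--     """Extrait les portions de code qui sont précédées de do() et pas de don't()
--     :param code: code brut
--     :return chaine de caractères concaténant les instructions à prendre en compte
--     """
--     enabled_code: list[str] = []
--     portions_of_code: list[str] = code.split("don't()")
--     # la portion de code qui précède le premier don't est forcément enabled
--     enabled_code.append(portions_of_code[0])
--     for i in range(1, len(portions_of_code)):
--         conditional_statements: list[str] = portions_of_code[i].split("do()")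
--         if len(conditional_statements) > 1:
--             enabled_code.extend(conditional_statements[1:])
--     return reduce(lambda str1, str2: str1 + str2, enabled_code)
-- ===== SOURCE B (Python) =====
-- def extract_enabled_code(code: str) -> str:
--     """Single left-to-right scan: disable at don't(), re-enable at a do() that
--     follows some don't() (such do() markers are consumed, earlier ones kept)."""
--     out = []
--     enabled = True
--     seen_dont = False
--     i = 0
--     n = len(code)
--     while i < n:
--         if code.startswith("don't()", i):
--             enabled = False
--             seen_dont = True
--             i += 7
--         elif seen_dont and code.startswith("do()", i):
--             enabled = True
--             i += 4
--         else:
--             if enabled: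
--                 out.append(code[i])
--             i += 1
--     return "".join(out)
-- ===== Notes on version B (the rewrite author's own statement) =====
-- stated objective: alternative
-- what changed: A splits the text on "don't()", re-splits each later portion on "do()" and concatenates the kept pieces; B is a single left-to-right scanner that keeps/drops characters with an enabled flag (plus a seen_dont flag so text before the first don't() is kept literally), consuming marker substrings as it meets them.
import Mathlib
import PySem

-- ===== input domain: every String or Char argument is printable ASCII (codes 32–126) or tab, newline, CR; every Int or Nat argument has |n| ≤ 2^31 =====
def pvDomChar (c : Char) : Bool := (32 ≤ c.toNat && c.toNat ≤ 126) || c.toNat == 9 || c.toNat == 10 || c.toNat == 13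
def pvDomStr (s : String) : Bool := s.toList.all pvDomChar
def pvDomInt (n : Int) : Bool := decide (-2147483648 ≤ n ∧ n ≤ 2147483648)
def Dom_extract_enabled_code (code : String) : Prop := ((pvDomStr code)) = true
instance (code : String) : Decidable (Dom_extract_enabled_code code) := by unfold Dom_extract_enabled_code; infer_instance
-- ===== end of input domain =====

-- B replaces A's split/re-split pipeline by one left-to-right scanner over the characters
-- (objective: alternative decomposition, same asymptotic cost).


-- ===== PORT A =====
-- code.split("don't()") / portion.split("do()") are ported with PySem.Chars.splitOn
-- (the sep ≠ "" form of Python str.split); reduce(+, enabled_code) is a left fold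
-- starting from the (always present) first element.
def extract_enabled_code (code : String) : String :=
  let portions : List (List Char) := PySem.Chars.splitOn code.toList "don't()".toList
  let enabled0 : List (List Char) := [portions.headD []]
  let enabled : List (List Char) :=
    (PySem.List.pyRange 1 (PySem.List.len portions)).foldl (fun acc i =>
      let conds := PySem.Chars.splitOn (PySem.List.pyGetD portions i []) "do()".toList
      if conds.length > 1 then acc ++ conds.drop 1 else acc) enabled0
  String.ofList ((enabled.drop 1).foldl (fun a b => a ++ b) (enabled.headD []))

-- ===== PORT B =====
-- B's while-loop over the index, as structural recursion over the remaining characters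
-- with the same state (enabled, seen_dont).
def scanAlt : List Char → Bool → Bool → List Char
  | [], _, _ => []
  | c :: rest, enabled, seenDont =>
    if "don't()".toList.isPrefixOf (c :: rest) then
      scanAlt ((c :: rest).drop 7) false true
    else if seenDont && "do()".toList.isPrefixOf (c :: rest) then
      scanAlt ((c :: rest).drop 4) true seenDont
    else
      (if enabled then [c] else []) ++ scanAlt rest enabled seenDont
termination_by l _ _ => l.length
decreasing_by
  all_goals simp

def extract_enabled_code_alt (code : String) : String :=
  String.ofList (scanAlt code.toList true false)

-- ===== PRECONDITION & SPEC =====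
def Spec_extract_enabled_code (code : String) (out : String) : Prop := out = extract_enabled_code_alt code
instance (code : String) (out : String) : Decidable (Spec_extract_enabled_code code out) := by unfold Spec_extract_enabled_code; infer_instance

-- ===== CLAIM (what is proved, stated in full; the proofs are below) =====
def Claim_equal_extract_enabled_code : Prop := ∀ (code : String), Dom_extract_enabled_code code → Spec_extract_enabled_code code (extract_enabled_code code)

-- ===== LEMMAS AND PROOFS =====

-- A structurally-recursive characterisation of PySem.Chars.splitOn (for sep ≠ []).
def splitSpec (sep : List Char) : List Char → List (List Char)
  | [] => [[]]
  | c :: rest =>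
    if sep.isPrefixOf (c :: rest) = true ∧ sep ≠ [] then
      [] :: splitSpec sep ((c :: rest).drop sep.length)
    else
      (splitSpec sep rest).modifyHead (c :: ·)
termination_by l => l.length
decreasing_by
  · have : sep.length ≠ 0 := by
      rename_i h; exact fun h0 => h.2 (List.eq_nil_of_length_eq_zero h0)
    simp; omega
  · simp

lemma go_eq (sep : List Char) (hsep : sep ≠ []) :
    ∀ (fuel : ℕ) (l cur : List Char) (acc : List (List Char)), l.length ≤ fuel →
      PySem.Chars.splitOn.go sep fuel l cur acc
        = acc.reverse ++ (splitSpec sep l).modifyHead (fun x => cur.reverse ++ x) := by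
  intro fuel
  induction fuel with
  | zero =>
    intro l cur acc hl
    have hnil : l = [] := List.eq_nil_of_length_eq_zero (Nat.le_zero.mp hl)
    subst hnil
    rw [PySem.Chars.splitOn.go]
    simp [splitSpec]
  | succ f ih =>
    intro l cur acc hl
    cases l with
    | nil =>
      rw [PySem.Chars.splitOn.go]
      · simp [splitSpec]
      · omega
    | cons c rest =>
      rw [PySem.Chars.splitOn.go]
      by_cases hp : sep.isPrefixOf (c :: rest)
      · rw [if_pos hp]
        rw [ih ((c :: rest).drop sep.length) [] (cur.reverse :: acc)
            (by have : sep.length ≠ 0 := fun h0 => hsep (List.eq_nil_of_length_eq_zero h0)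
                simp at hl ⊢; omega)]
        rw [splitSpec, if_pos ⟨hp, hsep⟩]
        cases splitSpec sep ((c :: rest).drop sep.length) <;> simp
      · rw [if_neg hp]
        rw [ih rest (c :: cur) acc (by simp at hl; omega)]
        rw [splitSpec, if_neg (by simp [hp])]
        cases splitSpec sep rest <;> simp

lemma splitOn_eq (sep l : List Char) (hsep : sep ≠ []) :
    PySem.Chars.splitOn l sep = splitSpec sep l := by
  show PySem.Chars.splitOn.go sep (l.length + 1) l [] [] = _
  rw [go_eq sep hsep (l.length + 1) l [] [] (by omega)]
  cases splitSpec sep l <;> simp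

lemma splitSpec_ne_nil (sep l : List Char) : splitSpec sep l ≠ [] := by
  induction l with
  | nil => simp [splitSpec]
  | cons c rest ih =>
    rw [splitSpec]
    split
    · simp
    · cases h : splitSpec sep rest
      · exact absurd h ih
      · simp

lemma splitSpec_head_prefix (sep l : List Char) : (splitSpec sep l).headD [] <+: l := by
  induction l with
  | nil => simp [splitSpec]
  | cons c rest ih =>
    rw [splitSpec]
    split
    · simp
    · cases h : splitSpec sep rest with
      | nil => exact absurd h (splitSpec_ne_nil sep rest)
      | cons hd tl =>
        rw [h] at ih
        simpa using ih

-- A-side semantics, phrased over splitSpec.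
def gPiece (p : List Char) : List Char := ((splitSpec "do()".toList p).drop 1).flatten
def Qsem (l : List Char) : List Char := ((splitSpec "don\'t()".toList l).map gPiece).flatten
def Rsem (l : List Char) : List Char :=
  (splitSpec "do()".toList ((splitSpec "don\'t()".toList l).headD [])).flatten
    ++ (((splitSpec "don\'t()".toList l).drop 1).map gPiece).flatten
def Ssem (l : List Char) : List Char :=
  (splitSpec "don\'t()".toList l).headD []
    ++ (((splitSpec "don\'t()".toList l).drop 1).map gPiece).flatten

lemma Dappend (t : List Char) : "don't()".toList ++ t = 'd'::'o'::'n'::'\''::'t'::'('::')'::t := by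
  rw [show "don't()".toList = ['d','o','n','\'','t','(',')'] from by decide]; rfl

lemma Oappend (t : List Char) : "do()".toList ++ t = 'd'::'o'::'('::')'::t := by
  rw [show "do()".toList = ['d','o','(',')'] from by decide]; rfl

lemma splitSpec_pos (sep t : List Char) (hsep : sep ≠ []) :
    splitSpec sep (sep ++ t) = [] :: splitSpec sep t := by
  cases sep with
  | nil => exact absurd rfl hsep
  | cons s0 sr =>
    show splitSpec (s0::sr) (s0 :: (sr ++ t)) = _
    rw [splitSpec, if_pos ⟨List.isPrefixOf_iff_prefix.mpr (List.prefix_append _ t), hsep⟩]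
    congr 1
    show splitSpec _ (((s0::sr) ++ t).drop (s0::sr).length) = _
    rw [List.drop_left]

lemma splitSpec_neg (sep : List Char) (c : Char) (rest : List Char)
    (h : sep.isPrefixOf (c :: rest) = false) :
    splitSpec sep (c :: rest) = (splitSpec sep rest).modifyHead (c :: ·) := by
  rw [splitSpec, if_neg (by simp [h])]

lemma splitD_pos (t : List Char) :
    splitSpec "don't()".toList ('d'::'o'::'n'::'\''::'t'::'('::')'::t)
      = [] :: splitSpec "don't()".toList t := by
  rw [← Dappend]; exact splitSpec_pos _ t (by decide)

lemma splitO_pos (t : List Char) :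
    splitSpec "do()".toList ('d'::'o'::'('::')'::t) = [] :: splitSpec "do()".toList t := by
  rw [← Oappend]; exact splitSpec_pos _ t (by decide)

lemma splitD_O (t : List Char) :
    splitSpec "don't()".toList ('d'::'o'::'('::')'::t)
      = (splitSpec "don't()".toList t).modifyHead (fun x => 'd'::'o'::'('::')'::x) := by
  rw [splitSpec_neg _ _ _ (by simp [List.isPrefixOf]),
      splitSpec_neg _ _ _ (by simp [List.isPrefixOf]),
      splitSpec_neg _ _ _ (by simp [List.isPrefixOf]),
      splitSpec_neg _ _ _ (by simp [List.isPrefixOf])]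
  cases h : splitSpec "don't()".toList t with
  | nil => exact absurd h (splitSpec_ne_nil _ _)
  | cons hd tl => simp

lemma gPiece_O (p : List Char) :
    gPiece ('d'::'o'::'('::')'::p) = (splitSpec "do()".toList p).flatten := by
  unfold gPiece; rw [splitO_pos]; simp

lemma gPiece_nil : gPiece [] = [] := by simp [gPiece, splitSpec]

lemma notO_head (c : Char) (rest : List Char)
    (hO : "do()".toList.isPrefixOf (c :: rest) = false) :
    "do()".toList.isPrefixOf (c :: (splitSpec "don't()".toList rest).headD []) = false := by
  by_contra hcon
  rw [Bool.not_eq_false] at hcon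
  have p1 := List.isPrefixOf_iff_prefix.mp hcon
  have p2 : (c :: (splitSpec "don't()".toList rest).headD []) <+: c :: rest :=
    List.cons_prefix_cons.mpr ⟨rfl, splitSpec_head_prefix _ _⟩
  have := List.isPrefixOf_iff_prefix.mpr (p1.trans p2)
  rw [hO] at this; cases this

lemma QR_eq : ∀ (n : ℕ) (l : List Char), l.length ≤ n →
    Qsem l = scanAlt l false true ∧ Rsem l = scanAlt l true true := by
  intro n
  induction n with
  | zero =>
    intro l hl
    have hnil : l = [] := List.eq_nil_of_length_eq_zero (Nat.le_zero.mp hl)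
    subst hnil
    constructor <;> simp [Qsem, Rsem, gPiece, splitSpec, scanAlt]
  | succ n ih =>
    intro l hl
    cases l with
    | nil => constructor <;> simp [Qsem, Rsem, gPiece, splitSpec, scanAlt]
    | cons c rest =>
      by_cases hD : "don't()".toList.isPrefixOf (c :: rest) = true
      · obtain ⟨t, ht⟩ := List.isPrefixOf_iff_prefix.mp hD
        have ht' : c :: rest = 'd'::'o'::'n'::'\''::'t'::'('::')'::t := by
          rw [← ht, Dappend]
        rw [ht']
        have hlen : t.length ≤ n := by
          have := congrArg List.length ht'
          simp at this hl; omega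
        have hq := (ih t hlen).1
        have hscan : ∀ e : Bool, scanAlt ('d'::'o'::'n'::'\''::'t'::'('::')'::t) e true
            = scanAlt t false true := by
          intro e
          rw [scanAlt, if_pos (by rw [← Dappend]; exact List.isPrefixOf_iff_prefix.mpr (List.prefix_append _ t))]
          norm_num
        constructor
        · unfold Qsem
          rw [splitD_pos, hscan]
          simp only [List.map_cons, List.flatten_cons, gPiece_nil, List.nil_append]
          exact hq
        · unfold Rsem
          rw [splitD_pos, hscan]
          simp only [List.headD_cons, List.drop_one, List.tail_cons]
          rw [show splitSpec "do()".toList [] = [[]] from by rw [splitSpec]]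
          simpa using hq
      · rw [Bool.not_eq_true] at hD
        by_cases hO : "do()".toList.isPrefixOf (c :: rest) = true
        · obtain ⟨t, ht⟩ := List.isPrefixOf_iff_prefix.mp hO
          have ht' : c :: rest = 'd'::'o'::'('::')'::t := by rw [← ht, Oappend]
          rw [ht']
          have hlen : t.length ≤ n := by
            have := congrArg List.length ht'
            simp at this hl; omega
          have hr := (ih t hlen).2
          have hscan : ∀ e : Bool, scanAlt ('d'::'o'::'('::')'::t) e true
              = scanAlt t true true := by
            intro e
            rw [scanAlt, if_neg (by rw [ht'] at hD; simp),
                if_pos (by rw [← Oappend]; simp)]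
            norm_num
          cases hsp : splitSpec "don't()".toList t with
          | nil => exact absurd hsp (splitSpec_ne_nil _ _)
          | cons hd tl =>
            constructor
            · unfold Qsem
              rw [splitD_O, hsp, hscan, ← hr]
              unfold Rsem
              rw [hsp]
              simp only [List.modifyHead, List.map_cons, List.flatten_cons, gPiece_O,
                List.headD_cons, List.drop_one, List.tail_cons]
            · unfold Rsem
              rw [splitD_O, hsp, hscan, ← hr]
              unfold Rsem
              rw [hsp]
              simp only [List.modifyHead, List.headD_cons, splitO_pos, List.flatten_cons,
                List.nil_append, List.drop_one, List.tail_cons]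
        · rw [Bool.not_eq_true] at hO
          have hlen : rest.length ≤ n := by simp at hl; omega
          have hq := (ih rest hlen).1
          have hr := (ih rest hlen).2
          have hsp := splitSpec_neg "don't()".toList c rest hD
          cases h : splitSpec "don't()".toList rest with
          | nil => exact absurd h (splitSpec_ne_nil _ _)
          | cons hd tl =>
            have hpre := notO_head c rest hO
            rw [h] at hpre hsp
            simp only [List.headD_cons] at hpre
            have hsOc := splitSpec_neg "do()".toList c hd hpre
            have hscan : ∀ e : Bool, scanAlt (c :: rest) e true
                = (if e then [c] else []) ++ scanAlt rest e true := by
              intro e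
              rw [scanAlt, if_neg (by rw [hD]; simp), if_neg (by rw [hO]; simp)]
            have hgc : gPiece (c :: hd) = gPiece hd := by
              unfold gPiece
              rw [hsOc]
              cases splitSpec "do()".toList hd <;> simp
            constructor
            · unfold Qsem
              rw [hsp, hscan]
              simp only [List.modifyHead, List.map_cons, List.flatten_cons, hgc,
                Bool.false_eq_true, if_false, List.nil_append]
              rw [← hq]
              unfold Qsem
              rw [h]
              simp only [List.map_cons, List.flatten_cons]
            · unfold Rsem
              rw [hsp, hscan]
              simp only [List.modifyHead, List.headD_cons, List.drop_one, List.tail_cons,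
                if_true, List.cons_append]
              rw [hsOc]
              rw [← hr]
              unfold Rsem
              rw [h]
              simp only [List.headD_cons, List.drop_one, List.tail_cons]
              cases hsOhd : splitSpec "do()".toList hd with
              | nil => exact absurd hsOhd (splitSpec_ne_nil _ _)
              | cons x xs => simp

lemma S_eq (l : List Char) : Ssem l = scanAlt l true false := by
  induction l with
  | nil => simp [Ssem, splitSpec, scanAlt]
  | cons c rest ih =>
    by_cases hD : "don't()".toList.isPrefixOf (c :: rest) = true
    · obtain ⟨t, ht⟩ := List.isPrefixOf_iff_prefix.mp hD
      have ht' : c :: rest = 'd'::'o'::'n'::'\''::'t'::'('::')'::t := by rw [← ht, Dappend]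
      rw [ht']
      rw [show scanAlt ('d'::'o'::'n'::'\''::'t'::'('::')'::t) true false = scanAlt t false true from by
            rw [scanAlt, if_pos (by rw [← Dappend]
                                    exact List.isPrefixOf_iff_prefix.mpr (List.prefix_append _ t))]
            norm_num]
      unfold Ssem
      rw [splitD_pos]
      simp only [List.headD_cons, List.drop_one, List.tail_cons, List.nil_append]
      rw [← (QR_eq t.length t le_rfl).1]
      unfold Qsem
      rfl
    · rw [Bool.not_eq_true] at hD
      have hsp := splitSpec_neg "don't()".toList c rest hD
      cases h : splitSpec "don't()".toList rest with
      | nil => exact absurd h (splitSpec_ne_nil _ _)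
      | cons hd tl =>
        rw [h] at hsp
        unfold Ssem
        rw [hsp]
        simp only [List.modifyHead, List.headD_cons, List.drop_one, List.tail_cons]
        rw [scanAlt, if_neg (by rw [hD]; simp), if_neg (by simp)]
        rw [← ih]
        unfold Ssem
        rw [h]
        simp

lemma foldl_extend (t : List (List Char)) : ∀ init,
    t.foldl (fun acc p =>
      if (PySem.Chars.splitOn p "do()".toList).length > 1
      then acc ++ (PySem.Chars.splitOn p "do()".toList).drop 1 else acc) init
      = init ++ t.flatMap (fun p => (splitSpec "do()".toList p).drop 1) := by
  induction t with
  | nil => intro init; simp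
  | cons p t ih =>
    intro init
    rw [List.foldl_cons, ih]
    rw [splitOn_eq _ _ (by decide)]
    split_ifs with hgt
    · simp [List.append_assoc]
    · have hnil : (splitSpec "do()".toList p).drop 1 = [] := by
        rw [List.drop_eq_nil_iff]; omega
      rw [List.flatMap_cons, hnil, List.nil_append]

lemma foldl_append_flatten (xs : List (List Char)) : ∀ a,
    xs.foldl (fun x y => x ++ y) a = a ++ xs.flatten := by
  induction xs with
  | nil => intro a; simp
  | cons x xs ih => intro a; rw [List.foldl_cons, ih]; simp

lemma flatten_flatMap (t : List (List Char)) :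
    (t.flatMap (fun p => (splitSpec "do()".toList p).drop 1)).flatten
      = (t.map gPiece).flatten := by
  induction t with
  | nil => rfl
  | cons p t ih =>
    rw [List.flatMap_cons, List.map_cons, List.flatten_append, List.flatten_cons, ih]
    unfold gPiece
    rfl

lemma portA_eq (code : String) : extract_enabled_code code = String.ofList (Ssem code.toList) := by
  unfold extract_enabled_code
  simp only []
  rw [PySem.List.foldl_pyRange_pyGetD (PySem.Chars.splitOn code.toList "don't()".toList) []
      (fun acc p =>
        if (PySem.Chars.splitOn p "do()".toList).length > 1
        then acc ++ (PySem.Chars.splitOn p "do()".toList).drop 1 else acc)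
      [(PySem.Chars.splitOn code.toList "don't()".toList).headD []] (by norm_num)]
  rw [splitOn_eq _ _ (by decide)]
  cases hsp : splitSpec "don't()".toList code.toList with
  | nil => exact absurd hsp (splitSpec_ne_nil _ _)
  | cons hd tl =>
    rw [foldl_extend, foldl_append_flatten]
    show String.ofList (hd ++ (tl.flatMap (fun p => (splitSpec "do()".toList p).drop 1)).flatten)
        = String.ofList (Ssem code.toList)
    rw [flatten_flatMap]
    unfold Ssem
    rw [hsp]
    rfl

-- ===== VERDICT (by name: the statement is the Claim_ definition above) =====
theorem extract_enabled_code_spec : Claim_equal_extract_enabled_code := by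
  intro code _
  unfold Spec_extract_enabled_code extract_enabled_code_alt
  rw [portA_eq, S_eq]
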